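-- pv_equiv track=rewrite | github.com/zengtianli/scripts | .assets/scripts/md_to_qmd.py | find_table_ranges
-- ===== SOURCE A (Python) =====
-- def find_table_ranges(text: str) -> list:
--     """找出所有表格的位置范围"""
--     ranges = []
--     lines = text.split('\n')
--
--     char_pos = 0
--     i = 0
--     while i < len(lines):
--         line = lines[i]
--         line_start = char_pos
--
--         # 检测表格开始
--         if line.strip().startswith('|') or '<table' in line.lower():
--             table_start = line_start
--             while i < len(lines):
--                 curr_line = lines[i] if i < len(lines) else ''
--                 if curr_line.strip().startswith('|') or '<table' in curr_line.lower() or \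
--                    '<tr' in curr_line.lower() or '<td' in curr_line.lower() or \
--                    '</table' in curr_line.lower() or curr_line.strip().startswith('|'):
--                     char_pos += len(curr_line) + 1
--                     i += 1
--                     if '</table>' in curr_line.lower():
--                         break
--                 else:
--                     break
--             table_end = char_pos
--             ranges.append((table_start, table_end))
--         else:
--             char_pos += len(line) + 1
--             i += 1
--
--     return ranges
-- ===== SOURCE B (Python) =====
-- def find_table_ranges(text: str) -> list:
--     """Single forward pass as a state machine: no nested scan and no index
--     arithmetic — a fold over the lines whose state holds the offset where the open table began,
--     emitting a range at each close transition and flushing at the end."""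
--     ranges = []
--     pos = 0
--     start = None  # offset where the currently open table began, or None
--     for line in text.split('\n'):
--         low = line.lower()
--         is_start = line.strip().startswith('|') or '<table' in low
--         is_cont = is_start or '<tr' in low or '<td' in low or '</table' in low
--         end = pos + len(line) + 1
--         if start is None:
--             if is_start:
--                 if '</table>' in low:
--                     ranges.append((pos, end))
--                 else:
--                     start = pos
--         else:
--             if is_cont:
--                 if '</table>' in low:
--                     ranges.append((start, end))
--                     start = None
--             else:
--                 ranges.append((start, pos))
--                 start = None
--         pos = end
--     if start is not None:
--         ranges.append((start, pos))
--     return ranges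
-- ===== Notes on version B (the rewrite author's own statement) =====
-- stated objective: alternative
-- what changed: B replaces A's nested while loops (an outer scan that re-enters an inner table-consuming scan re-reading lines by index) with a single linear fold over the lines carrying the offset at which the currently open table began as state, emitting a range at each close transition and flushing once at the end; no inner loop and no index variables remain.
import Mathlib
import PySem

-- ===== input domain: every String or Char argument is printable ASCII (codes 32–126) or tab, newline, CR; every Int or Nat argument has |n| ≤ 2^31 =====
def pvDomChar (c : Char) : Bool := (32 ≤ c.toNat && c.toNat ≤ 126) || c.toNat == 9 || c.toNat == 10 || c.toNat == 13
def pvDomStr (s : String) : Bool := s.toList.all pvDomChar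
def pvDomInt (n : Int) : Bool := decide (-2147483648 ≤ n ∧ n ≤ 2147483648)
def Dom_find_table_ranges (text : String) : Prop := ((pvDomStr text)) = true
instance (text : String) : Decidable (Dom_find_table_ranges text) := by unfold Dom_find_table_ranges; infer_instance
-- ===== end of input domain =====

-- B replaces A's nested scans by one linear fold with an open-table state and a final flush (alternative decomposition, same cost).

-- ===== PORT A =====
def pvIsStartA (line : String) : Bool :=
  PySem.Str.startswith (PySem.Str.strip line) "|" || PySem.Str.isIn "<table" (PySem.Str.lower line)

def pvIsContA (line : String) : Bool :=
  PySem.Str.startswith (PySem.Str.strip line) "|" || PySem.Str.isIn "<table" (PySem.Str.lower line) ||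
  PySem.Str.isIn "<tr" (PySem.Str.lower line) || PySem.Str.isIn "<td" (PySem.Str.lower line) ||
  PySem.Str.isIn "</table" (PySem.Str.lower line) || PySem.Str.startswith (PySem.Str.strip line) "|"

-- the inner `while` of A: consumes table lines, threading (i, char_pos)
def pvAInner (lines : List String) : Nat → Nat → Int → Nat × Int
  | 0, i, pos => (i, pos)
  | fuel+1, i, pos =>
    if i < lines.length then
      let curr := lines.getD i ""
      if pvIsContA curr then
        if PySem.Str.isIn "</table>" (PySem.Str.lower curr) then
          (i + 1, pos + (PySem.Str.len curr : Int) + 1)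
        else
          pvAInner lines fuel (i + 1) (pos + (PySem.Str.len curr : Int) + 1)
      else (i, pos)
    else (i, pos)

-- the outer `while` of A
def pvAOuter (lines : List String) : Nat → Nat → Int → List (Int × Int)
  | 0, _, _ => []
  | fuel+1, i, pos =>
    if i < lines.length then
      let line := lines.getD i ""
      if pvIsStartA line then
        let r := pvAInner lines (fuel+1) i pos
        (pos, r.2) :: pvAOuter lines fuel r.1 r.2
      else
        pvAOuter lines fuel (i + 1) (pos + (PySem.Str.len line : Int) + 1)
    else []

def find_table_ranges (text : String) : List (Int × Int) :=
  let lines := (PySem.Str.split? text "\n").getD []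
  pvAOuter lines lines.length 0 0

-- ===== PORT B =====
-- B's per-line predicates (python locals is_start / is_cont / '</table>' test)
def pvIsStartB (line : String) : Bool :=
  PySem.Str.startswith (PySem.Str.strip line) "|" || PySem.Str.isIn "<table" (PySem.Str.lower line)

def pvIsContB (line : String) : Bool :=
  pvIsStartB line || PySem.Str.isIn "<tr" (PySem.Str.lower line) ||
  PySem.Str.isIn "<td" (PySem.Str.lower line) || PySem.Str.isIn "</table" (PySem.Str.lower line)

def pvIsEndB (line : String) : Bool := PySem.Str.isIn "</table>" (PySem.Str.lower line)

-- the body of B's single `for` loop; state = (pos, ranges, offset where the currently open table began)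
def pvStepB (st : Int × List (Int × Int) × Option Int) (line : String) :
    Int × List (Int × Int) × Option Int :=
  let pos := st.1
  let acc := st.2.1
  let e := pos + (PySem.Str.len line : Int) + 1
  match st.2.2 with
  | none =>
    if pvIsStartB line then
      if pvIsEndB line then (e, acc ++ [(pos, e)], none)
      else (e, acc, some pos)
    else (e, acc, none)
  | some s =>
    if pvIsContB line then
      if pvIsEndB line then (e, acc ++ [(s, e)], none)
      else (e, acc, some s)
    else (e, acc ++ [(s, pos)], none)

def find_table_ranges_alt (text : String) : List (Int × Int) :=
  let lines := (PySem.Str.split? text "\n").getD []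
  let st := lines.foldl pvStepB (0, [], none)
  match st.2.2 with
  | some s => st.2.1 ++ [(s, st.1)]
  | none => st.2.1

-- ===== PRECONDITION & SPEC =====
def Spec_find_table_ranges (text : String) (out : List (Int × Int)) : Prop := out = find_table_ranges_alt text
instance (text : String) (out : List (Int × Int)) : Decidable (Spec_find_table_ranges text out) := by unfold Spec_find_table_ranges; infer_instance

-- ===== CLAIM (what is proved, stated in full; the proofs are below) =====
def Claim_equal_find_table_ranges : Prop := ∀ (text : String), Dom_find_table_ranges text → Spec_find_table_ranges text (find_table_ranges text)

-- ===== LEMMAS AND PROOFS =====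

-- flush at the end of B's loop
def pvFinal (st : Int × List (Int × Int) × Option Int) : List (Int × Int) :=
  match st.2.2 with
  | some s => st.2.1 ++ [(s, st.1)]
  | none => st.2.1

theorem pvStartAB (l : String) : pvIsStartA l = pvIsStartB l := rfl

theorem pvBoolDup (a b c d e : Bool) :
    (a || b || c || d || e || a) = ((a || b) || c || d || e) := by
  cases a <;> cases b <;> cases c <;> cases d <;> cases e <;> rfl

theorem pvContAB (l : String) : pvIsContA l = pvIsContB l := by
  unfold pvIsContA pvIsContB pvIsStartB
  exact pvBoolDup _ _ _ _ _

theorem pvStart_imp_cont (l : String) (h : pvIsStartA l = true) : pvIsContB l = true := by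
  unfold pvIsContB
  rw [← pvStartAB, h]
  rfl

-- rfl-characterizations of B's step on a closed / open state
theorem pvStepB_none (pos : Int) (acc : List (Int × Int)) (line : String) :
    pvStepB (pos, acc, none) line =
      (if pvIsStartB line then
        if pvIsEndB line then
          (pos + (PySem.Str.len line : Int) + 1, acc ++ [(pos, pos + (PySem.Str.len line : Int) + 1)], none)
        else (pos + (PySem.Str.len line : Int) + 1, acc, some pos)
      else (pos + (PySem.Str.len line : Int) + 1, acc, none)) := rfl

theorem pvStepB_some (pos : Int) (acc : List (Int × Int)) (s : Int) (line : String) :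
    pvStepB (pos, acc, some s) line =
      (if pvIsContB line then
        if pvIsEndB line then
          (pos + (PySem.Str.len line : Int) + 1, acc ++ [(s, pos + (PySem.Str.len line : Int) + 1)], none)
        else (pos + (PySem.Str.len line : Int) + 1, acc, some s)
      else (pos + (PySem.Str.len line : Int) + 1, acc ++ [(s, pos)], none)) := rfl

-- inner-loop invariant: pvAInner stays within bounds and moves forward
theorem pvAInner_bounds (lines : List String) (fuel : Nat) :
    ∀ (i : Nat) (pos : Int), i ≤ lines.length →
      i ≤ (pvAInner lines fuel i pos).1 ∧ (pvAInner lines fuel i pos).1 ≤ lines.length := by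
  induction fuel with
  | zero => intro i pos hi; exact ⟨le_refl _, hi⟩
  | succ fuel ih =>
    intro i pos hi
    simp only [pvAInner]
    split_ifs with h1 h2 h3
    · exact ⟨by omega, by omega⟩
    · have := ih (i + 1) (pos + (PySem.Str.len (lines.getD i "") : Int) + 1) (by omega)
      exact ⟨by omega, this.2⟩
    · exact ⟨le_refl _, hi⟩
    · exact ⟨le_refl _, hi⟩

-- inner loop vs the fold: consuming a table with open start s equals emitting the
-- range at A's inner-loop exit point and continuing the fold closed from there
theorem pvInnerFold (lines : List String) (fuel : Nat) :
    ∀ (i : Nat) (pos : Int) (acc : List (Int × Int)) (s : Int),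
      i ≤ lines.length → lines.length - i ≤ fuel →
      pvFinal ((lines.drop i).foldl pvStepB (pos, acc, some s)) =
      pvFinal ((lines.drop (pvAInner lines fuel i pos).1).foldl pvStepB
        ((pvAInner lines fuel i pos).2,
         acc ++ [(s, (pvAInner lines fuel i pos).2)], none)) := by
  induction fuel with
  | zero =>
    intro i pos acc s hi hf
    have hend : i = lines.length := by omega
    subst hend
    simp [pvAInner, pvFinal]
  | succ fuel ih =>
    intro i pos acc s hi hf
    by_cases h1 : i < lines.length
    · have hdrop : lines.drop i = lines.getD i "" :: lines.drop (i + 1) := by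
        rw [List.getD_eq_getElem lines "" h1]
        exact (List.drop_eq_getElem_cons h1)
      simp only [pvAInner, if_pos h1]
      set curr := lines.getD i "" with hcurr
      by_cases h2 : pvIsContA curr = true
      · have h2' : pvIsContB curr = true := by rw [← pvContAB]; exact h2
        by_cases h3 : PySem.Str.isIn "</table>" (PySem.Str.lower curr) = true
        · have h3' : pvIsEndB curr = true := h3
          rw [if_pos h2, if_pos h3]
          rw [hdrop, List.foldl_cons, pvStepB_some, if_pos h2', if_pos h3']
        · have h3' : pvIsEndB curr = false := eq_false_of_ne_true h3
          rw [if_pos h2, if_neg h3]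
          rw [hdrop, List.foldl_cons, pvStepB_some, if_pos h2', if_neg (by simp [h3'])]
          exact ih (i + 1) _ acc s (by omega) (by omega)
      · have h2' : pvIsContB curr = false := by
          rw [← pvContAB]; exact eq_false_of_ne_true h2
        rw [if_neg h2]
        -- inner loop exits at line i; the fold closes the table at `pos` and then
        -- processes line i as a non-start line (¬cont ⇒ ¬start)
        have hns : pvIsStartB curr = false := by
          by_contra hc
          have : pvIsStartB curr = true := by revert hc; cases pvIsStartB curr <;> simp
          have := pvStart_imp_cont curr ((pvStartAB curr) ▸ this)
          rw [h2'] at this; exact Bool.false_ne_true this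
        conv_lhs => rw [hdrop, List.foldl_cons, pvStepB_some, if_neg (by simp [h2'])]
        conv_rhs => rw [hdrop, List.foldl_cons, pvStepB_none, if_neg (by simp [hns])]
    · have hend : i = lines.length := by omega
      subst hend
      simp [pvAInner, pvFinal]

-- outer loop vs the fold
theorem pvOuterFold (lines : List String) (fuel : Nat) :
    ∀ (i : Nat) (pos : Int) (acc : List (Int × Int)),
      i ≤ lines.length → lines.length - i ≤ fuel →
      acc ++ pvAOuter lines fuel i pos =
      pvFinal ((lines.drop i).foldl pvStepB (pos, acc, none)) := by
  induction fuel with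
  | zero =>
    intro i pos acc hi hf
    have hend : i = lines.length := by omega
    subst hend
    simp [pvAOuter, pvFinal]
  | succ fuel ih =>
    intro i pos acc hi hf
    by_cases h1 : i < lines.length
    · have hdrop : lines.drop i = lines.getD i "" :: lines.drop (i + 1) := by
        rw [List.getD_eq_getElem lines "" h1]
        exact (List.drop_eq_getElem_cons h1)
      simp only [pvAOuter, if_pos h1]
      set curr := lines.getD i "" with hcurr
      by_cases h2 : pvIsStartA curr = true
      · rw [if_pos h2]
        have h2' : pvIsStartB curr = true := (pvStartAB curr) ▸ h2
        have hcont : pvIsContA curr = true := by rw [pvContAB]; exact pvStart_imp_cont curr h2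
        by_cases h3 : PySem.Str.isIn "</table>" (PySem.Str.lower curr) = true
        · -- table closed on its start line: inner consumes exactly line i
          have h3' : pvIsEndB curr = true := h3
          have hinner : pvAInner lines (fuel + 1) i pos =
              (i + 1, pos + (PySem.Str.len curr : Int) + 1) := by
            simp only [pvAInner, if_pos h1, ← hcurr]
            rw [if_pos hcont, if_pos h3]
          rw [hinner]
          rw [hdrop, List.foldl_cons, pvStepB_none, if_pos h2', if_pos h3']
          have := ih (i + 1) (pos + (PySem.Str.len curr : Int) + 1)
            (acc ++ [(pos, pos + (PySem.Str.len curr : Int) + 1)]) (by omega) (by omega)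
          simpa using this
        · -- table continues: the fold opens state `some pos`
          have h3' : pvIsEndB curr = false := eq_false_of_ne_true h3
          have hinner : pvAInner lines (fuel + 1) i pos =
              pvAInner lines fuel (i + 1) (pos + (PySem.Str.len curr : Int) + 1) := by
            simp only [pvAInner, if_pos h1, ← hcurr]
            rw [if_pos hcont, if_neg h3]
          rw [hinner]
          rw [hdrop, List.foldl_cons, pvStepB_none, if_pos h2', if_neg (by simp [h3'])]
          set r := pvAInner lines fuel (i + 1) (pos + (PySem.Str.len curr : Int) + 1) with hr
          have hb := pvAInner_bounds lines fuel (i + 1)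
            (pos + (PySem.Str.len curr : Int) + 1) (by omega)
          rw [← hr] at hb
          rw [pvInnerFold lines fuel (i + 1) _ acc pos (by omega) (by omega), ← hr]
          have := ih r.1 r.2 (acc ++ [(pos, r.2)]) hb.2 (by omega)
          simpa using this
      · have h2' : pvIsStartB curr = false := (pvStartAB curr) ▸ eq_false_of_ne_true h2
        rw [if_neg h2]
        rw [hdrop, List.foldl_cons, pvStepB_none, if_neg (by simp [h2'])]
        exact ih (i + 1) _ acc (by omega) (by omega)
    · have hend : i = lines.length := by omega
      subst hend
      simp [pvAOuter, pvFinal]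

-- ===== VERDICT (by name: the statement is the Claim_ definition above) =====
theorem find_table_ranges_spec : Claim_equal_find_table_ranges := by
  intro text _
  unfold Spec_find_table_ranges find_table_ranges find_table_ranges_alt
  have h := pvOuterFold ((PySem.Str.split? text "\n").getD []) ((PySem.Str.split? text "\n").getD []).length 0 0 [] (Nat.zero_le _) (by omega)
  simpa [pvFinal] using h
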